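-- pv_equiv track=rewrite | github.com/timetestedbible/timetestedbible.github.io | http-v1/scripts/parse_facts.py | yaml_escape
-- ===== SOURCE A (Python) =====
-- def yaml_escape(s):
--     """Escape string for YAML."""
--     if not s:
--         return '""'
--     s = str(s)
--     # If contains special chars, quote it
--     if any(c in s for c in [':', '#', "'", '"', '\n', '[', ']', '{', '}', ',', '&', '*', '!', '|', '>', '%', '@', '`']):
--         # Use double quotes and escape internal quotes
--         s = s.replace('\\', '\\\\').replace('"', '\\"')
--         return f'"{s}"'
--     return s
-- ===== SOURCE B (Python) =====
-- def yaml_escape(s):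
--     """Escape string for YAML (single-pass: escape and detect specials in one loop)."""
--     if not s:
--         return '""'
--     s = str(s)
--     special = set(':#\'"\n[]{},&*!|>%@`')
--     escaped = []
--     needs_quote = False
--     for c in s:
--         if c in special:
--             needs_quote = True
--         if c == '\\':
--             escaped.append('\\\\')
--         elif c == '"':
--             escaped.append('\\"')
--         else:
--             escaped.append(c)
--     if needs_quote:
--         return '"' + ''.join(escaped) + '"'
--     return s
-- ===== Notes on version B (the rewrite author's own statement) =====
-- stated objective: alternative
-- what changed: Replaces A's any(...) membership scan over the 18 special characters plus two full .replace() passes with a single loop over the string that simultaneously builds the escaped copy and sets a needs-quote flag.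
import Mathlib
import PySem

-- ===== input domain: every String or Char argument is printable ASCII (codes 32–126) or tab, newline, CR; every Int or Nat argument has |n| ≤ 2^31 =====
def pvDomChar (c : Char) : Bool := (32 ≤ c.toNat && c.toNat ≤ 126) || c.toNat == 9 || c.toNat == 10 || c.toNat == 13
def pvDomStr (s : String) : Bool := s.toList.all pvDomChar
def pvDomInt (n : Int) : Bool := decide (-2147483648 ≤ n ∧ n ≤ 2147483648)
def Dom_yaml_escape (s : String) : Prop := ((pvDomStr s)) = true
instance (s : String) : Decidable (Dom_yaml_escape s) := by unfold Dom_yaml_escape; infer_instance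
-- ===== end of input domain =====

-- B replaces A's three separate scans (an any(...) membership scan plus two .replace passes)
-- by one combined pass that escapes and detects special characters together (objective: alternative).


-- ===== PORT A =====
def yaml_escape (s : String) : String :=
  if s = "" then "\"\"" else
  if ([':', '#', '\'', '"', '\n', '[', ']', '{', '}', ',', '&', '*', '!', '|', '>', '%', '@', '`'].any
        (fun c => PySem.Str.isIn (String.ofList [c]) s)) then
    let s1 := PySem.Str.replace s "\\" "\\\\"
    let s2 := PySem.Str.replace s1 "\"" "\\\""
    "\"" ++ s2 ++ "\""
  else s

-- ===== PORT B =====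
def pvSpecials : List Char := [':', '#', '\'', '"', '\n', '[', ']', '{', '}', ',', '&', '*', '!', '|', '>', '%', '@', '`']

def pvEscChar (c : Char) : List Char :=
  if c = '\\' then ['\\', '\\'] else if c = '"' then ['\\', '"'] else [c]

def yaml_escape_alt (s : String) : String :=
  if s = "" then "\"\"" else
  let st := s.toList.foldl
    (fun (acc : List Char × Bool) c => (acc.1 ++ pvEscChar c, acc.2 || pvSpecials.contains c))
    ([], false)
  if st.2 then "\"" ++ String.ofList st.1 ++ "\"" else s

-- ===== PRECONDITION & SPEC =====
def Spec_yaml_escape (s : String) (out : String) : Prop := out = yaml_escape_alt s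
instance (s : String) (out : String) : Decidable (Spec_yaml_escape s out) := by unfold Spec_yaml_escape; infer_instance

-- ===== CLAIM (what is proved, stated in full; the proofs are below) =====
def Claim_equal_yaml_escape : Prop := ∀ (s : String), Dom_yaml_escape s → Spec_yaml_escape s (yaml_escape s)

-- ===== LEMMAS AND PROOFS =====

-- replace with a single-char pattern is a flatMap
theorem replace_go_single (c : Char) (new : List Char) :
    ∀ (l : List Char) (fuel : Nat) (acc : List Char), l.length ≤ fuel →
      PySem.Chars.replace.go [c] new fuel l acc
        = acc.reverse ++ l.flatMap (fun x => if x = c then new else [x]) := by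
  intro l
  induction l with
  | nil =>
    intro fuel acc _
    cases fuel <;> simp [PySem.Chars.replace.go]
  | cons c' t ih =>
    intro fuel acc h
    simp only [List.length_cons] at h
    cases fuel with
    | zero => omega
    | succ fuel =>
      rw [PySem.Chars.replace.go]
      by_cases hc : c' = c
      · subst hc
        have hpref : List.isPrefixOf [c'] (c' :: t) = true := by
          simp [List.isPrefixOf]
        simp only [hpref, if_true]
        rw [show List.drop (List.length [c']) (c' :: t) = t from rfl]
        rw [ih fuel (new.reverse ++ acc) (by omega)]
        simp
      · have hpref : List.isPrefixOf [c] (c' :: t) = false := by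
          simp only [List.isPrefixOf, Bool.and_eq_false_iff, beq_eq_false_iff_ne, ne_eq]
          exact Or.inl fun h' => hc h'.symm
        simp only [hpref, Bool.false_eq_true, if_false]
        rw [ih fuel (c' :: acc) (by omega)]
        simp [hc]

theorem replace_single (l : List Char) (c : Char) (new : List Char) :
    PySem.Chars.replace l [c] new = l.flatMap (fun x => if x = c then new else [x]) := by
  rw [PySem.Chars.replace]
  rw [if_neg (by simp)]
  rw [replace_go_single c new l l.length [] le_rfl]
  simp

-- the double replace of port A equals the single-pass escape of port B
theorem double_replace_eq (l : List Char) :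
    (l.flatMap (fun x => if x = '\\' then ['\\', '\\'] else [x])).flatMap
        (fun x => if x = '"' then ['\\', '"'] else [x])
      = l.flatMap pvEscChar := by
  induction l with
  | nil => simp
  | cons x t ih =>
    simp only [List.flatMap_cons, List.flatMap_append, ih]
    congr 1
    by_cases h1 : x = '\\'
    · subst h1; simp [pvEscChar]
    · by_cases h2 : x = '"'
      · subst h2; simp [pvEscChar]
      · simp [h1, h2, pvEscChar]

-- B's fold builds the escaped list and the needs-quote flag
theorem foldl_esc (l : List Char) :
    ∀ (acc : List Char) (b : Bool),
      l.foldl (fun (st : List Char × Bool) c => (st.1 ++ pvEscChar c, st.2 || pvSpecials.contains c)) (acc, b)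
        = (acc ++ l.flatMap pvEscChar, b || l.any (fun c => pvSpecials.contains c)) := by
  induction l with
  | nil => intro acc b; simp
  | cons c t ih =>
    intro acc b
    simp only [List.foldl_cons, ih, List.flatMap_cons, List.any_cons]
    simp [Bool.or_assoc]

-- A's special-character test equals B's scan of the string
theorem cond_eq (s : String) :
    (pvSpecials.any (fun c => PySem.Str.isIn (String.ofList [c]) s))
      = s.toList.any (fun c => pvSpecials.contains c) := by
  rw [Bool.eq_iff_iff]
  simp only [List.any_eq_true, PySem.Str.isIn]
  constructor
  · rintro ⟨c, hc, hin⟩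
    rw [show (String.ofList [c]).toList = [c] by simp] at hin
    rw [PySem.Chars.isIn_iff_infix] at hin
    exact ⟨c, hin.subset (List.mem_singleton_self c), by simp [hc]⟩
  · rintro ⟨c, hc, hmem⟩
    simp only [List.contains_eq_mem, decide_eq_true_eq] at hmem
    refine ⟨c, hmem, ?_⟩
    rw [show (String.ofList [c]).toList = [c] by simp]
    rw [PySem.Chars.isIn_iff_infix]
    obtain ⟨l1, l2, h⟩ := List.append_of_mem hc
    rw [h]
    exact ⟨l1, l2, by simp⟩

-- ===== VERDICT (by name: the statement is the Claim_ definition above) =====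
theorem yaml_escape_spec : Claim_equal_yaml_escape := by
  intro s _
  unfold Spec_yaml_escape yaml_escape yaml_escape_alt
  by_cases hs : s = ""
  · simp [hs]
  · rw [if_neg hs, if_neg hs]
    rw [show ([':', '#', '\'', '"', '\n', '[', ']', '{', '}', ',', '&', '*', '!', '|', '>', '%', '@', '`'] : List Char) = pvSpecials from rfl]
    rw [cond_eq s]
    rw [foldl_esc s.toList [] false]
    simp only [List.nil_append, Bool.false_or]
    by_cases hq : s.toList.any (fun c => pvSpecials.contains c) = true
    · rw [if_pos hq, if_pos hq]
      apply String.toList_inj.mp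
      simp only [PySem.Str.replace, String.toList_append,
        show ("\\" : String).toList = ['\\'] from rfl,
        show ("\\\\" : String).toList = ['\\', '\\'] from rfl,
        show ("\"" : String).toList = ['"'] from rfl,
        show ("\\\"" : String).toList = ['\\', '"'] from rfl,
        replace_single]
      simp [double_replace_eq]
    · rw [if_neg hq, if_neg hq]
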